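-- pv_equiv track=rewrite | github.com/mobeen786822/job-application-assistant | tools/resume_bot.py | extract_template_header
-- ===== SOURCE A (Python) =====
-- def extract_template_header(template_text: str) -> str | None:
--     start = template_text.find('<div class="header">')
--     if start == -1:
--         return None
--     i = start
--     depth = 0
--     while i < len(template_text):
--         if template_text.startswith('<div', i):
--             depth += 1
--         elif template_text.startswith('</div>', i):
--             depth -= 1
--             if depth == 0:
--                 end = i + len('</div>')
--                 return template_text[start:end]
--         i += 1
--     return None
-- ===== SOURCE B (Python) =====
-- def _find_all(text, token, start):
--     positions = []
--     i = text.find(token, start)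
--     while i != -1:
--         positions.append(i)
--         i = text.find(token, i + 1)
--     return positions
--
-- def extract_template_header(template_text: str) -> str | None:
--     start = template_text.find('<div class="header">')
--     if start == -1:
--         return None
--     opens = _find_all(template_text, '<div', start)
--     closes = _find_all(template_text, '</div>', start)
--     oi, ci = 0, 0
--     depth = 0
--     while ci < len(closes):
--         if oi < len(opens) and opens[oi] < closes[ci]:
--             depth += 1
--             oi += 1
--         else:
--             depth -= 1
--             if depth == 0:
--                 return template_text[start:closes[ci] + 6]
--             ci += 1
--     return None
-- ===== Notes on version B (the rewrite author's own statement) =====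
-- stated objective: alternative
-- what changed: B replaces A's single character-by-character startswith scan with staged passes: it first collects all '<div' and all '</div>' match positions into two sorted lists via repeated str.find, then runs a two-pointer merge over the two position lists with a balance counter.
import Mathlib
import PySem

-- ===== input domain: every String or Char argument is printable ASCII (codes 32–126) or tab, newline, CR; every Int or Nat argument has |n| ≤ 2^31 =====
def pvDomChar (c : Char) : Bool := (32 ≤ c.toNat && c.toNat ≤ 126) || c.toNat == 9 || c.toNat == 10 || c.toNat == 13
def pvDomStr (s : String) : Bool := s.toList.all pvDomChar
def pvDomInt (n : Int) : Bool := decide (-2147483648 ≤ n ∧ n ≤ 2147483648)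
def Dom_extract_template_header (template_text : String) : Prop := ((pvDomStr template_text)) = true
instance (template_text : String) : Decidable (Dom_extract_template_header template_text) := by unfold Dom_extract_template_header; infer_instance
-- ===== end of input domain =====

-- B replaces A's single character-by-character startswith scan with staged passes: it first
-- collects all '<div' and all '</div>' match positions into two sorted lists via repeated
-- str.find, then runs a two-pointer merge over the two position lists with a balance counter.

-- ===== PORT A =====
-- A's while-loop: step i by 1, test '<div' / '</div>' at i, return the end index i+6 when
-- depth returns to 0 (the final slice text[start:end] is taken by the wrapper below).
-- The fuel argument only makes the recursion total; the wrapper passes enough fuel.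
def pvLoopA (cs : List Char) : Nat → Nat → Int → Option Nat
  | 0, _, _ => none
  | fuel + 1, i, depth =>
    if i < cs.length then
      if PySem.Chars.startswith (cs.drop i) ['<','d','i','v'] then
        pvLoopA cs fuel (i + 1) (depth + 1)
      else if PySem.Chars.startswith (cs.drop i) ['<','/','d','i','v','>'] then
        if depth - 1 = 0 then some (i + 6) else pvLoopA cs fuel (i + 1) (depth - 1)
      else pvLoopA cs fuel (i + 1) depth
    else none

def extract_template_header (template_text : String) : Option String :=
  let start := PySem.Str.find template_text "<div class=\"header\">"
  if start = -1 then none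
  else (pvLoopA template_text.toList template_text.toList.length start.toNat 0).map
    (fun e => PySem.Str.slice template_text (some start) (some (e : Int)))

-- ===== PORT B =====
-- _find_all: repeated text.find(token, i) collecting every match position (fuel for totality).
def pvFindAll (cs tok : List Char) : Nat → Nat → List Nat
  | 0, _ => []
  | fuel + 1, i =>
    if PySem.Chars.findFrom cs tok (i : Int) none = -1 then []
    else (PySem.Chars.findFrom cs tok (i : Int) none).toNat ::
      pvFindAll cs tok fuel ((PySem.Chars.findFrom cs tok (i : Int) none).toNat + 1)

-- B's while-loop: two-pointer merge of the open/close position lists with a balance counter;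
-- returns the end index closes[ci]+6 (the wrapper takes the slice).
def pvLoopB : List Nat → List Nat → Int → Option Nat
  | _, [], _ => none
  | [], c :: cr, depth =>
      if depth - 1 = 0 then some (c + 6) else pvLoopB [] cr (depth - 1)
  | o :: orest, c :: cr, depth =>
      if o < c then pvLoopB orest (c :: cr) (depth + 1)
      else if depth - 1 = 0 then some (c + 6) else pvLoopB (o :: orest) cr (depth - 1)
termination_by opens closes _ => opens.length + closes.length

def extract_template_header_alt (template_text : String) : Option String :=
  let start := PySem.Str.find template_text "<div class=\"header\">"
  if start = -1 then none
  else
    let cs := template_text.toList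
    let opens := pvFindAll cs ['<','d','i','v'] (cs.length + 1) start.toNat
    let closes := pvFindAll cs ['<','/','d','i','v','>'] (cs.length + 1) start.toNat
    (pvLoopB opens closes 0).map
      (fun e => PySem.Str.slice template_text (some start) (some (e : Int)))

-- ===== PRECONDITION & SPEC =====
def Spec_extract_template_header (template_text : String) (out : Option String) : Prop := out = extract_template_header_alt template_text
instance (template_text : String) (out : Option String) : Decidable (Spec_extract_template_header template_text out) := by unfold Spec_extract_template_header; infer_instance

-- ===== CLAIM =====
def Claim_equal_extract_template_header : Prop := ∀ (template_text : String), Dom_extract_template_header template_text → Spec_extract_template_header template_text (extract_template_header template_text)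

-- ===== LEMMAS AND PROOFS =====

-- Specification object: the (sorted) list of ALL positions ≥ i where tok matches.
def pvM (cs tok : List Char) (i : Nat) : List Nat :=
  if i < cs.length then
    (if PySem.Chars.startswith (cs.drop i) tok then [i] else []) ++ pvM cs tok (i + 1)
  else []
termination_by cs.length - i

theorem pvM_ge (cs tok : List Char) :
    ∀ n i p, cs.length - i ≤ n → p ∈ pvM cs tok i → i ≤ p := by
  intro n
  induction n with
  | zero =>
    intro i p h hp
    rw [pvM, if_neg (by omega)] at hp
    simp at hp
  | succ n ih =>
    intro i p h hp
    rw [pvM] at hp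
    by_cases hl : i < cs.length
    · rw [if_pos hl] at hp
      rcases List.mem_append.mp hp with h1 | h1
      · split at h1 <;> simp_all
      · have := ih (i + 1) p (by omega) h1
        omega
    · rw [if_neg hl] at hp; simp at hp

theorem pvM_nil (cs tok : List Char) :
    ∀ n i, cs.length - i ≤ n →
    (∀ k, i ≤ k → PySem.Chars.startswith (cs.drop k) tok = false) →
    pvM cs tok i = [] := by
  intro n
  induction n with
  | zero =>
    intro i h _
    rw [pvM, if_neg (by omega)]
  | succ n ih =>
    intro i h hno
    rw [pvM]
    by_cases hl : i < cs.length
    · rw [if_pos hl, hno i le_rfl]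
      simp only [if_neg (Bool.false_ne_true), List.nil_append]
      exact ih (i + 1) (by omega) (fun k hk => hno k (by omega))
    · rw [if_neg hl]

theorem pvM_skip (cs tok : List Char) (htok : tok ≠ []) :
    ∀ n i m, m - i ≤ n → i ≤ m →
    (∀ k, i ≤ k → k < m → PySem.Chars.startswith (cs.drop k) tok = false) →
    pvM cs tok i = pvM cs tok m := by
  intro n
  induction n with
  | zero =>
    intro i m h1 h2 _
    have : i = m := by omega
    rw [this]
  | succ n ih =>
    intro i m h1 h2 hno
    by_cases he : i = m
    · rw [he]
    · have hi : i < m := by omega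
      rw [pvM]
      by_cases hl : i < cs.length
      · rw [if_pos hl, hno i le_rfl hi]
        simp only [if_neg (Bool.false_ne_true), List.nil_append]
        exact ih (i + 1) m (by omega) (by omega) (fun k hk1 hk2 => hno k (by omega) hk2)
      · rw [if_neg hl]
        rw [pvM_nil cs tok (cs.length - m) m le_rfl ?_]
        intro k hk
        have hdk : cs.drop k = [] := List.drop_eq_nil_of_le (by omega)
        rw [hdk]
        cases tok with
        | nil => exact absurd rfl htok
        | cons a t => rfl

-- one unfolding step of pvM below the length.
theorem pvM_cons (cs tok : List Char) (i : Nat) (h : i < cs.length) :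
    pvM cs tok i =
      (if PySem.Chars.startswith (cs.drop i) tok then [i] else []) ++ pvM cs tok (i + 1) := by
  rw [pvM, if_pos h]

-- startswith as a prefix statement (both directions used below).
theorem pvStarts_iff (l tok : List Char) :
    PySem.Chars.startswith l tok = true ↔ tok <+: l := PySem.Chars.startswith_iff l tok

-- The two tags never match at the same position.
theorem pvNotBoth (l : List Char) (h1 : PySem.Chars.startswith l ['<','d','i','v'] = true) :
    PySem.Chars.startswith l ['<','/','d','i','v','>'] = true → False := by
  intro h2
  obtain ⟨t1, ht1⟩ := (pvStarts_iff _ _).mp h1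
  obtain ⟨t2, ht2⟩ := (pvStarts_iff _ _).mp h2
  rw [← ht1] at ht2
  simp at ht2

-- findFrom with start past the length is -1.
theorem pvFindFrom_gt (cs tok : List Char) (i : Nat) (h : cs.length < i) :
    PySem.Chars.findFrom cs tok (i : Int) none = -1 := by
  simp only [PySem.Chars.findFrom]
  rw [if_neg (show ¬((i:Int) < 0) by omega)]
  rw [if_pos (show (cs.length:Int) < i by exact_mod_cast h)]

-- a nonempty token finds no match at or past the length.
theorem pvFindFrom_end (cs tok : List Char) (htok : tok ≠ []) (i : Nat)
    (h : cs.length ≤ i) : PySem.Chars.findFrom cs tok (i : Int) none = -1 := by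
  by_cases hlt : cs.length < i
  · exact pvFindFrom_gt cs tok i hlt
  · rw [PySem.Chars.findFrom_natCast_eq_neg_one_iff cs tok i (by omega)]
    rw [List.drop_eq_nil_of_le (by omega)]
    intro hinf
    have := hinf.sublist.length_le
    simp at this
    exact htok this

-- pvFindAll computes exactly pvM, given enough fuel.
theorem pvFindAll_eq (cs tok : List Char) (htok : tok ≠ []) :
    ∀ n i fuel, cs.length - i ≤ n → cs.length + 1 - i ≤ fuel →
    pvFindAll cs tok fuel i = pvM cs tok i := by
  intro n
  induction n with
  | zero =>
    intro i fuel h1 h2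
    have hno : ∀ k, i ≤ k → PySem.Chars.startswith (cs.drop k) tok = false := by
      intro k hk
      have hdk : cs.drop k = [] := List.drop_eq_nil_of_le (by omega)
      rw [hdk]
      cases tok with
      | nil => exact absurd rfl htok
      | cons a t => rfl
    rw [pvM_nil cs tok 0 i (by omega) hno]
    cases fuel with
    | zero => rfl
    | succ f => rw [pvFindAll, if_pos (pvFindFrom_end cs tok htok i (by omega))]
  | succ n ih =>
    intro i fuel h1 h2
    by_cases hend : cs.length ≤ i
    case pos =>
      have hno : ∀ k, i ≤ k → PySem.Chars.startswith (cs.drop k) tok = false := by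
        intro k hk
        have hdk : cs.drop k = [] := List.drop_eq_nil_of_le (by omega)
        rw [hdk]
        cases tok with
        | nil => exact absurd rfl htok
        | cons a t => rfl
      rw [pvM_nil cs tok 0 i (by omega) hno]
      cases fuel with
      | zero => rfl
      | succ f => rw [pvFindAll, if_pos (pvFindFrom_end cs tok htok i (by omega))]
    obtain ⟨f, rfl⟩ : ∃ g, fuel = g + 1 := ⟨fuel - 1, by omega⟩
    rw [pvFindAll]
    by_cases hj : PySem.Chars.findFrom cs tok (i : Int) none = -1
    · rw [if_pos hj]
      by_cases hle : i ≤ cs.length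
      · rw [PySem.Chars.findFrom_natCast_eq_neg_one_iff cs tok i hle] at hj
        refine (pvM_nil cs tok (n + 1) i h1 ?_).symm
        intro k hk
        by_contra hb
        rw [Bool.not_eq_false, pvStarts_iff] at hb
        apply hj
        have hsfx : cs.drop k <:+ cs.drop i := by
          have hk' : cs.drop k = (cs.drop i).drop (k - i) := by
            rw [List.drop_drop]; congr 1; omega
          rw [hk']; exact List.drop_suffix _ _
        exact hb.isInfix.trans hsfx.isInfix
      · omega
    · rw [if_neg hj]
      have hle : i ≤ cs.length := by
        by_contra hgt
        exact hj (pvFindFrom_gt cs tok i (by omega))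
      obtain ⟨hij, hpre, hmin⟩ := PySem.Chars.findFrom_natCast_spec cs tok i hle hj
      set j := PySem.Chars.findFrom cs tok (i : Int) none with hjdef
      have hij' : i ≤ j.toNat := by omega
      have hjl : j.toNat < cs.length := by
        by_contra hge
        have : cs.drop j.toNat = [] := List.drop_eq_nil_of_le (by omega)
        rw [this] at hpre
        have := hpre.length_le
        simp at this
        exact htok this
      have hskip : pvM cs tok i = pvM cs tok j.toNat := by
        refine pvM_skip cs tok htok (j.toNat - i) i j.toNat le_rfl hij' ?_
        intro k hk1 hk2
        by_contra hb
        rw [Bool.not_eq_false, pvStarts_iff] at hb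
        exact hmin k hk1 hk2 hb
      rw [hskip, pvM, if_pos hjl, if_pos ((pvStarts_iff _ _).mpr hpre)]
      rw [List.singleton_append]
      congr 1
      exact ih (j.toNat + 1) f (by omega) (by omega)

-- pvLoopB steps: consuming an open smaller than every close, or the head close.
theorem pvLoopB_open (i : Nat) (O C : List Nat) (d : Int)
    (hC : ∀ c ∈ C, i < c) :
    pvLoopB (i :: O) C d = pvLoopB O C (d + 1) := by
  cases C with
  | nil => rw [pvLoopB]; cases O <;> rw [pvLoopB]
  | cons c cr =>
    rw [pvLoopB, if_pos (hC c (List.mem_cons_self ..))]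

theorem pvLoopB_close (c : Nat) (O C : List Nat) (d : Int)
    (hO : ∀ o ∈ O, c < o) :
    pvLoopB O (c :: C) d = if d - 1 = 0 then some (c + 6) else pvLoopB O C (d - 1) := by
  cases O with
  | nil => rw [pvLoopB]
  | cons o orest =>
    rw [pvLoopB, if_neg (by have := hO o (List.mem_cons_self ..); omega)]

-- A loop returns none past the end of the string.
theorem pvLoopA_high (cs : List Char) (i : Nat) (h : cs.length ≤ i) :
    ∀ fuel depth, pvLoopA cs fuel i depth = none := by
  intro fuel depth
  cases fuel with
  | zero => rfl
  | succ fuel => rw [pvLoopA, if_neg (by omega)]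

-- Main lemma: A's character scan equals B's merge over the two match-position lists.
theorem pvLoopAB (cs : List Char) :
    ∀ n i depth fuel, cs.length - i ≤ n → cs.length - i ≤ fuel →
    pvLoopA cs fuel i depth =
      pvLoopB (pvM cs ['<','d','i','v'] i) (pvM cs ['<','/','d','i','v','>'] i) depth := by
  intro n
  induction n with
  | zero =>
    intro i depth fuel h1 _
    rw [pvLoopA_high cs i (by omega),
      pvM_nil cs _ 0 i (by omega) (fun k hk => by
        rw [List.drop_eq_nil_of_le (by omega)]; rfl),
      pvM_nil cs _ 0 i (by omega) (fun k hk => by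
        rw [List.drop_eq_nil_of_le (by omega)]; rfl)]
    rw [pvLoopB]
  | succ n ih =>
    intro i depth fuel h1 hf
    by_cases hl : i < cs.length
    case neg =>
      rw [pvLoopA_high cs i (by omega),
        pvM_nil cs _ 0 i (by omega) (fun k hk => by
          rw [List.drop_eq_nil_of_le (by omega)]; rfl),
        pvM_nil cs _ 0 i (by omega) (fun k hk => by
          rw [List.drop_eq_nil_of_le (by omega)]; rfl)]
      rw [pvLoopB]
    obtain ⟨f, rfl⟩ : ∃ g, fuel = g + 1 := ⟨fuel - 1, by omega⟩
    rw [pvLoopA, if_pos hl]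
    rw [pvM_cons cs ['<','d','i','v'] i hl, pvM_cons cs ['<','/','d','i','v','>'] i hl]
    by_cases ho : PySem.Chars.startswith (cs.drop i) ['<','d','i','v'] = true
    · have hc : PySem.Chars.startswith (cs.drop i) ['<','/','d','i','v','>'] = false := by
        by_contra hb
        rw [Bool.not_eq_false] at hb
        exact pvNotBoth _ ho hb
      rw [if_pos ho, if_pos ho, hc]
      simp only [if_neg (Bool.false_ne_true), List.nil_append, List.singleton_append]
      rw [pvLoopB_open i _ _ depth
        (fun c hc' => by have := pvM_ge cs _ (cs.length - (i+1)) (i+1) c le_rfl hc'; omega)]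
      exact ih (i + 1) (depth + 1) f (by omega) (by omega)
    · rw [if_neg ho, (Bool.not_eq_true _).mp ho]
      simp only [if_neg (Bool.false_ne_true), List.nil_append]
      by_cases hc : PySem.Chars.startswith (cs.drop i) ['<','/','d','i','v','>'] = true
      · rw [if_pos hc, if_pos hc, List.singleton_append]
        rw [pvLoopB_close i _ _ depth
          (fun o hoo => by have := pvM_ge cs _ (cs.length - (i+1)) (i+1) o le_rfl hoo; omega)]
        by_cases hd : depth - 1 = 0
        · rw [if_pos hd, if_pos hd]
        · rw [if_neg hd, if_neg hd]
          exact ih (i + 1) (depth - 1) f (by omega) (by omega)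
      · rw [if_neg hc, (Bool.not_eq_true _).mp hc]
        simp only [if_neg (Bool.false_ne_true), List.nil_append]
        exact ih (i + 1) depth f (by omega) (by omega)

-- ===== VERDICT =====
theorem extract_template_header_spec : Claim_equal_extract_template_header := by
  intro t _
  unfold Spec_extract_template_header
  simp only [extract_template_header, extract_template_header_alt]
  by_cases hf : PySem.Str.find t "<div class=\"header\">" = -1
  · rw [if_pos hf, if_pos hf]
  · rw [if_neg hf, if_neg hf]
    rw [pvFindAll_eq t.toList ['<','d','i','v'] (by simp) t.toList.length _ _
        (by omega) (by omega),
      pvFindAll_eq t.toList ['<','/','d','i','v','>'] (by simp) t.toList.length _ _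
        (by omega) (by omega),
      pvLoopAB t.toList t.toList.length _ 0 t.toList.length (by omega) (by omega)]
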